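-- pv_equiv track=rewrite | github.com/robertogarita/Proyecto-3-POO | FINAL SERVER TEMPORAL.py | Buscador_inicial_3
-- ===== SOURCE A (Python) =====
-- def inversa(matriz):
--     i=0
--     lista_new=[]
--     i=(len(matriz)-1)
--     while(i!=-1):
--         lista_new+=[matriz[i]]
--         i-=1
--     return lista_new
--
-- def Buscador_inicial_3(matriz):
--     ma = inversa(matriz)
--     bandera = 0
--     lista=[]
--     i = 0
--     p = 1
--     while(i<len(matriz)):
--         p = i + 1
--         while(p<len(matriz)):
--             if ma[i][2]==ma[p][2]:
--                 bandera=1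
--                 p+=1
--             else:
--                 p+=1
--         if bandera==0:
--             lista=[ma[i]]+lista
--         i+=1
--         bandera=0
--     return lista
-- ===== SOURCE B (Python) =====
-- def Buscador_inicial_3(matriz):
--     seen = set()
--     result = []
--     for row in matriz:
--         if row[2] not in seen:
--             seen.add(row[2])
--             result.append(row)
--     return result
-- ===== Notes on version B (the rewrite author's own statement) =====
-- stated objective: faster
-- what changed: Replaced reverse-the-matrix + nested quadratic scan + prepending with a single forward pass keeping a set of third-column values already seen (first occurrence per third value, original order).
-- outside the precondition, e.g. on Buscador_inicial_3([[1]]): A returns [[1]], B raises IndexError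
import Mathlib
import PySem

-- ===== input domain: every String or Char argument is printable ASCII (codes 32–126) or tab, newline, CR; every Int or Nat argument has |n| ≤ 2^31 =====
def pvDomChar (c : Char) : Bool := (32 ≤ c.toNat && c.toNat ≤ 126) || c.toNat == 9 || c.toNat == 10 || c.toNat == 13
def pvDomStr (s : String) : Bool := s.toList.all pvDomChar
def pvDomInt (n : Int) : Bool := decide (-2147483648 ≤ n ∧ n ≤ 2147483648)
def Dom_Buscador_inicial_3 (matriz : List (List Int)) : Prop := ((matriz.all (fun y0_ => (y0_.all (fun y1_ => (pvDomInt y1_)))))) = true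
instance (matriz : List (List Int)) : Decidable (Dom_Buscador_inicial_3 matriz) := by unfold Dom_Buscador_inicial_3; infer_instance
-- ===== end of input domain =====

-- B replaces A's reverse + nested quadratic scan + prepend with one forward pass and a seen-set
-- of third-column values (objective: faster, O(n^2) → O(n)).

-- ===== PORT A =====
-- row[2] (both Pythons read exactly index 2 of a row); total form, exact under Pre_ (rows have ≥ 3 fields)
def pvKey (r : List Int) : Int := PySem.List.pyGetD r 2 0

-- ma[k][2]
def pvRowKey (ma : List (List Int)) (k : Nat) : Int := pvKey (PySem.List.pyGetD ma (k : Int) [])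

-- 'inversa': while(i!=-1): lista_new+=[matriz[i]]; i-=1   (fuel n = i+1)
def pvInversaGo (matriz : List (List Int)) (acc : List (List Int)) : Nat → List (List Int)
  | 0 => acc
  | n + 1 => pvInversaGo matriz (acc ++ [PySem.List.pyGetD matriz (n : Int) []]) n

def pvInversa (matriz : List (List Int)) : List (List Int) :=
  pvInversaGo matriz [] matriz.length

-- inner while: while(p<len): if ma[i][2]==ma[p][2]: bandera=1; p+=1
def pvInnerGo (ma : List (List Int)) (i : Nat) (bandera : Int) (p len : Nat) : Int :=
  if p < len then
    pvInnerGo ma i (if pvRowKey ma i == pvRowKey ma p then 1 else bandera) (p + 1) len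
  else bandera
termination_by len - p

-- outer while: while(i<len): …inner…; if bandera==0: lista=[ma[i]]+lista; i+=1
def pvOuterGo (ma : List (List Int)) (len i : Nat) (lista : List (List Int)) : List (List Int) :=
  if i < len then
    pvOuterGo ma len (i + 1)
      (if pvInnerGo ma i 0 (i + 1) len == 0 then [PySem.List.pyGetD ma (i : Int) []] ++ lista else lista)
  else lista
termination_by len - i

def Buscador_inicial_3 (matriz : List (List Int)) : List (List Int) :=
  pvOuterGo (pvInversa matriz) matriz.length 0 []

-- ===== PORT B =====
-- for row in matriz: if row[2] not in seen: seen.add(row[2]); result.append(row)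
def pvAltGo (rows : List (List Int)) (seen : PySem.Set Int) (result : List (List Int)) : List (List Int) :=
  match rows with
  | [] => result
  | row :: rest =>
    if PySem.Set.contains seen (pvKey row) then pvAltGo rest seen result
    else pvAltGo rest (PySem.Set.add seen (pvKey row)) (result ++ [row])

def Buscador_inicial_3_alt (matriz : List (List Int)) : List (List Int) :=
  pvAltGo matriz PySem.Set.empty []

-- ===== PRECONDITION & SPEC =====
-- Pre_ excludes matrices containing a row with fewer than 3 fields: there Python A raises IndexError
-- whenever the matrix has ≥ 2 rows, and on the single-short-row corner (e.g. [[1]]) A accidentally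
-- returns the row untouched while B's natural row[2] access raises IndexError.
def Pre_Buscador_inicial_3 (matriz : List (List Int)) : Prop :=
  (matriz.all (fun r => decide (3 ≤ r.length))) = true
instance (matriz : List (List Int)) : Decidable (Pre_Buscador_inicial_3 matriz) := by
  unfold Pre_Buscador_inicial_3; infer_instance

def pvWitness_Buscador_inicial_3 : List (List Int) := [[1, 2, 3], [4, 5, 3], [7, 8, 9]]

def Spec_Buscador_inicial_3 (matriz : List (List Int)) (out : List (List Int)) : Prop := out = Buscador_inicial_3_alt matriz
instance (matriz : List (List Int)) (out : List (List Int)) : Decidable (Spec_Buscador_inicial_3 matriz out) := by unfold Spec_Buscador_inicial_3; infer_instance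

-- ===== CLAIM (what is proved, stated in full; the proofs are below) =====
def Claim_equal_Buscador_inicial_3 : Prop := ∀ (matriz : List (List Int)), Dom_Buscador_inicial_3 matriz → Pre_Buscador_inicial_3 matriz → Spec_Buscador_inicial_3 matriz (Buscador_inicial_3 matriz)

-- ===== LEMMAS AND PROOFS =====

-- proof-side spec: first occurrence per key, forward, with an explicit seen set
def pvFO (seen : PySem.Set Int) : List (List Int) → List (List Int)
  | [] => []
  | r :: rs =>
    if PySem.Set.contains seen (pvKey r) then pvFO seen rs
    else r :: pvFO (PySem.Set.add seen (pvKey r)) rs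

-- proof-side spec: keep rows whose key does not reappear later
def pvKeep : List (List Int) → List (List Int)
  | [] => []
  | r :: rs => (if pvKey r ∈ rs.map pvKey then ([] : List (List Int)) else [r]) ++ pvKeep rs

theorem pvAltGo_eq (rows : List (List Int)) : ∀ (seen : PySem.Set Int) (res : List (List Int)),
    pvAltGo rows seen res = res ++ pvFO seen rows := by
  induction rows with
  | nil => intro seen res; simp [pvAltGo, pvFO]
  | cons r rs ih =>
    intro seen res
    by_cases h : pvKey r ∈ seen
    · simp [pvAltGo, pvFO, PySem.Set.contains_iff, h, ih]
    · simp [pvAltGo, pvFO, PySem.Set.contains_iff, h, ih]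

theorem pvFO_append (l : List (List Int)) : ∀ (seen : PySem.Set Int) (r : List Int),
    pvFO seen (l ++ [r]) =
      pvFO seen l ++ (if pvKey r ∈ seen ∨ pvKey r ∈ l.map pvKey then ([] : List (List Int)) else [r]) := by
  induction l with
  | nil =>
    intro seen r
    by_cases h : pvKey r ∈ seen <;>
      simp [pvFO, PySem.Set.contains_iff, h]
  | cons x xs ih =>
    intro seen r
    by_cases hx : pvKey x ∈ seen
    · simp only [List.cons_append, pvFO, PySem.Set.contains_iff]
      rw [if_pos hx, if_pos hx, ih]
      congr 1
      have : (pvKey r ∈ seen ∨ pvKey r ∈ xs.map pvKey) ↔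
          (pvKey r ∈ seen ∨ pvKey r ∈ (x :: xs).map pvKey) := by
        simp only [List.map_cons, List.mem_cons]
        constructor
        · tauto
        · rintro (h | h | h)
          · tauto
          · exact Or.inl (h ▸ hx)
          · tauto
      rw [if_congr this rfl rfl]
    · simp only [List.cons_append, pvFO]
      rw [if_neg (by simp [PySem.Set.contains_iff, hx]),
          if_neg (by simp [PySem.Set.contains_iff, hx]), ih]
      have : (pvKey r ∈ PySem.Set.add seen (pvKey x) ∨ pvKey r ∈ xs.map pvKey) ↔
          (pvKey r ∈ seen ∨ pvKey r ∈ (x :: xs).map pvKey) := by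
        simp only [PySem.Set.mem_add, List.map_cons, List.mem_cons]
        tauto
      rw [if_congr this rfl rfl]
      simp

theorem pvKeep_reverse (m : List (List Int)) :
    (pvKeep m).reverse = pvFO PySem.Set.empty m.reverse := by
  induction m with
  | nil => simp [pvKeep, pvFO]
  | cons r rs ih =>
    simp only [pvKeep, List.reverse_append, List.reverse_cons, pvFO_append, ih]
    congr 1
    have : (pvKey r ∈ (PySem.Set.empty : PySem.Set Int) ∨ pvKey r ∈ rs.reverse.map pvKey) ↔
        (pvKey r ∈ rs.map pvKey) := by
      simp [PySem.Set.empty]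
    rw [if_congr this rfl rfl]
    by_cases h : pvKey r ∈ rs.map pvKey <;> simp [h]

theorem pv_take_succ_reverse : ∀ (l : List (List Int)) (k : Nat) (hk : k < l.length),
    (List.take (k + 1) l).reverse = l[k] :: (List.take k l).reverse := by
  intro l
  induction l with
  | nil => intro k hk; simp at hk
  | cons x xs ih =>
    intro k hk
    cases k with
    | zero => simp
    | succ j =>
      have hj : j < xs.length := by simpa using hk
      rw [List.take_succ_cons, List.reverse_cons, ih j hj, List.take_succ_cons,
          List.reverse_cons]
      simp

theorem pvInversaGo_eq (matriz : List (List Int)) : ∀ (n : Nat), n ≤ matriz.length →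
    ∀ (acc : List (List Int)), pvInversaGo matriz acc n = acc ++ (matriz.take n).reverse := by
  intro n
  induction n with
  | zero => intro _ acc; simp [pvInversaGo]
  | succ k ih =>
    intro hn acc
    have hk : k < matriz.length := by omega
    have hget : PySem.List.pyGetD matriz (k : Int) [] = matriz[k] := by
      rw [PySem.List.pyGetD_natCast]
      exact List.getD_eq_getElem _ _ hk
    rw [pvInversaGo, ih (by omega), hget, pv_take_succ_reverse matriz k hk]
    simp

theorem pvInversa_eq (matriz : List (List Int)) : pvInversa matriz = matriz.reverse := by
  rw [pvInversa, pvInversaGo_eq matriz matriz.length le_rfl]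
  simp

theorem pvRowKey_eq (ma : List (List Int)) (k : Nat) (hk : k < ma.length) :
    pvRowKey ma k = pvKey ma[k] := by
  rw [pvRowKey, PySem.List.pyGetD_natCast, List.getD_eq_getElem _ _ hk]

theorem pvInnerGo_eq_zero_iff (ma : List (List Int)) (i : Nat) :
    ∀ (b : Int) (p len : Nat),
    (pvInnerGo ma i b p len = 0 ↔
      (b = 0 ∧ ∀ q, p ≤ q → q < len → pvRowKey ma i ≠ pvRowKey ma q)) := by
  intro b p len
  fun_induction pvInnerGo ma i b p len with
  | case1 b p hp ih =>
    by_cases hk : pvRowKey ma i = pvRowKey ma p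
    · have hb : (pvRowKey ma i == pvRowKey ma p) = true := by simpa using hk
      rw [dif_pos hb] at ih
      rw [if_pos hb, ih]
      constructor
      · rintro ⟨h1, -⟩; exact absurd h1 (by norm_num)
      · rintro ⟨-, hall⟩; exact absurd hk (hall p le_rfl hp)
    · have hb : ¬ ((pvRowKey ma i == pvRowKey ma p) = true) := by simpa using hk
      rw [dif_neg hb] at ih
      rw [if_neg hb, ih]
      constructor
      · rintro ⟨h1, hall⟩
        refine ⟨h1, fun q hq1 hq2 => ?_⟩
        rcases Nat.eq_or_lt_of_le hq1 with h | h
        · exact h ▸ hk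
        · exact hall q h hq2
      · rintro ⟨h1, hall⟩
        exact ⟨h1, fun q hq1 hq2 => hall q (by omega) hq2⟩
  | case2 b p hp =>
    constructor
    · intro h; exact ⟨h, fun q hq1 hq2 => absurd hq2 (by omega)⟩
    · rintro ⟨h, -⟩; exact h

theorem key_mem_drop_iff (ma : List (List Int)) (i : Nat) (hi : i < ma.length) :
    (pvKey ma[i] ∈ (ma.drop (i + 1)).map pvKey) ↔
      ∃ q, ∃ hq : q < ma.length, i + 1 ≤ q ∧ pvKey ma[i] = pvKey (ma[q]'hq) := by
  constructor
  · intro h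
    rcases List.mem_map.1 h with ⟨r, hr, hkey⟩
    rcases List.mem_iff_getElem.1 hr with ⟨j, hj, hrj⟩
    have hlen : j < ma.length - (i + 1) := by simpa using hj
    refine ⟨i + 1 + j, by omega, by omega, ?_⟩
    rw [← hkey, ← hrj]
    simp only [List.getElem_drop]
  · rintro ⟨q, hq2, hq1, hkey⟩
    refine List.mem_map.2 ⟨ma[q]'hq2, ?_, hkey.symm⟩
    apply List.mem_iff_getElem.2
    refine ⟨q - (i + 1), by rw [List.length_drop]; omega, ?_⟩
    simp only [List.getElem_drop]
    congr 1
    omega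

theorem pvOuterGo_eq (ma : List (List Int)) (len : Nat) (hlen : len = ma.length) :
    ∀ (i : Nat) (lista : List (List Int)),
    pvOuterGo ma len i lista = (pvKeep (ma.drop i)).reverse ++ lista := by
  intro i lista
  fun_induction pvOuterGo ma len i lista with
  | case1 i lista hi ih =>
    subst hlen
    have hdrop : ma.drop i = ma[i] :: ma.drop (i + 1) := List.drop_eq_getElem_cons hi
    have hget : PySem.List.pyGetD ma (i : Int) [] = ma[i] := by
      rw [PySem.List.pyGetD_natCast]; exact List.getD_eq_getElem _ _ hi
    have hcond : (pvInnerGo ma i 0 (i + 1) ma.length == 0) = true ↔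
        pvKey ma[i] ∉ (ma.drop (i + 1)).map pvKey := by
      rw [beq_iff_eq, pvInnerGo_eq_zero_iff, key_mem_drop_iff ma i hi]
      constructor
      · rintro ⟨-, hall⟩ ⟨q, hq2, hq1, hkey⟩
        exact hall q hq1 hq2 (by rw [pvRowKey_eq ma i hi, pvRowKey_eq ma q hq2]; exact hkey)
      · intro hno
        refine ⟨rfl, fun q hq1 hq2 hk => hno ⟨q, hq2, hq1, ?_⟩⟩
        rw [pvRowKey_eq ma i hi, pvRowKey_eq ma q hq2] at hk
        exact hk
    by_cases hm : pvKey ma[i] ∈ (ma.drop (i + 1)).map pvKey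
    · have hb : ¬ ((pvInnerGo ma i 0 (i + 1) ma.length == 0) = true) := by
        rw [hcond]; exact fun h => h hm
      rw [dif_neg hb] at ih
      rw [if_neg hb, ih, hdrop, pvKeep, if_pos hm]
      simp
    · have hb : (pvInnerGo ma i 0 (i + 1) ma.length == 0) = true := hcond.2 hm
      rw [dif_pos hb] at ih
      rw [if_pos hb, ih, hdrop, pvKeep, if_neg hm, hget]
      simp
  | case2 i lista hi =>
    subst hlen
    rw [List.drop_eq_nil_of_le (by omega)]
    simp [pvKeep]

-- ===== VERDICT (by name: the statement is the Claim_ definition above) =====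
theorem Buscador_inicial_3_spec : Claim_equal_Buscador_inicial_3 := by
  intro matriz _ _
  unfold Spec_Buscador_inicial_3
  rw [Buscador_inicial_3, Buscador_inicial_3_alt, pvInversa_eq,
      pvOuterGo_eq matriz.reverse matriz.length (by simp) 0 [],
      pvAltGo_eq]
  simp only [List.drop_zero, List.append_nil, List.nil_append]
  rw [pvKeep_reverse]
  simp
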